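-- pv_equiv track=rewrite | github.com/bonshot/TDA_practicando | practica_por_temas/ejercicios_DIV.py | cuadrado_mas_cercano
-- ===== SOURCE A (Python) =====
-- def cuadrado_mas_cercano(n):
--     inicio, final = 0, n
--     while inicio <= final:
--         medio = (inicio+final)//2
--         medio_cuadrado = medio**2
--         if medio_cuadrado == n: #Encontre un numero al cuadrado igual a n
--             return medio_cuadrado
--         elif medio_cuadrado > n:
--             final = medio -1
--         else:
--             inicio = medio + 1
--             resultado = medio_cuadrado #Esta la posibilidad de que el cuadrado que busco sea este
--     return resultado
-- ===== SOURCE B (Python) =====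
-- def cuadrado_mas_cercano(n):
--     i = 0
--     while i * i <= n:
--         resultado = i * i
--         i += 1
--     return resultado
-- ===== Notes on version B (the rewrite author's own statement) =====
-- stated objective: simpler
-- what changed: Replaces the binary search over the interval with a plain incremental upward scan that records each square while it stays below the bound; no midpoints, halving or early-return branch.
import Mathlib
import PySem

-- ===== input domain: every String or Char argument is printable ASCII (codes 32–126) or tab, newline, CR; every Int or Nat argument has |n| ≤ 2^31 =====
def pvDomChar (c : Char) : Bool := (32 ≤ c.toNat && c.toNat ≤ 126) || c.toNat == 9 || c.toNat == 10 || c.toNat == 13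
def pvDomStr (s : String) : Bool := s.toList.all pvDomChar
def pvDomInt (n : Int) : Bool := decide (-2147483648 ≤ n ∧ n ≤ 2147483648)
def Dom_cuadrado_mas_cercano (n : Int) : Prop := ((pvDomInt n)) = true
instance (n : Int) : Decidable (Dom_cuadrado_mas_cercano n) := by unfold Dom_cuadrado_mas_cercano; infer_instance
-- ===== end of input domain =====

-- B replaces A's binary search with a plain incremental scan (simpler, not faster);
-- both raise UnboundLocalError on n < 0 ('resultado' only assigned inside the loop), excluded by Pre_.

-- ===== PORT A =====
-- the while-loop of A; res = the possibly still unbound variable 'resultado' (none = unbound)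
def pvLoopA (n inicio final : Int) (res : Option Int) : Option Int :=
  if h : inicio ≤ final then
    let medio := PySem.Int.floordiv (inicio + final) 2
    let medio_cuadrado := medio * medio
    if medio_cuadrado = n then some medio_cuadrado
    else if medio_cuadrado > n then pvLoopA n inicio (medio - 1) res
    else pvLoopA n (medio + 1) final (some medio_cuadrado)
  else res
termination_by (final - inicio + 1).toNat
decreasing_by
  · have hb := PySem.Int.floordiv_two_mid_bounds h
    omega
  · have hb := PySem.Int.floordiv_two_mid_bounds h
    omega

-- '.getD 0' is unreachable under Pre_: a 'none' result is Python's UnboundLocalError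
def cuadrado_mas_cercano (n : Int) : Int := (pvLoopA n 0 n none).getD 0

-- ===== PORT B =====
-- the while-loop of B; res = the possibly still unbound 'resultado'
def pvLoopB (n : Int) (i : Nat) (res : Option Int) : Option Int :=
  if _h : (i : Int) * i ≤ n then pvLoopB n (i + 1) (some ((i : Int) * i))
  else res
termination_by (n + 1 - i).toNat
decreasing_by
  have h2 : (i : Int) ≤ (i : Int) * i := by nlinarith [Int.natCast_nonneg i]
  omega

def cuadrado_mas_cercano_alt (n : Int) : Int := (pvLoopB n 0 none).getD 0

-- ===== PRECONDITION & SPEC =====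
-- Pre_ excludes n < 0, on which A (and B) raise UnboundLocalError
def Pre_cuadrado_mas_cercano (n : Int) : Prop := 0 ≤ n
instance (n : Int) : Decidable (Pre_cuadrado_mas_cercano n) := by unfold Pre_cuadrado_mas_cercano; infer_instance
def pvWitness_cuadrado_mas_cercano : Int := 10

def Spec_cuadrado_mas_cercano (n : Int) (out : Int) : Prop := out = cuadrado_mas_cercano_alt n
instance (n : Int) (out : Int) : Decidable (Spec_cuadrado_mas_cercano n out) := by unfold Spec_cuadrado_mas_cercano; infer_instance

-- ===== CLAIM (what is proved, stated in full; the proofs are below) =====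
def Claim_equal_cuadrado_mas_cercano : Prop := ∀ (n : Int), Dom_cuadrado_mas_cercano n → Pre_cuadrado_mas_cercano n → Spec_cuadrado_mas_cercano n (cuadrado_mas_cercano n)

-- ===== LEMMAS AND PROOFS =====

-- s := Nat.sqrt n.toNat is the integer square root; both loops return some (s*s).

lemma pvLoopA_eq (n : Int) (hn : 0 ≤ n) :
    ∀ (k : Nat) (lo hi : Int) (res : Option Int),
      (hi - lo + 1).toNat ≤ k →
      0 ≤ lo → lo ≤ (Nat.sqrt n.toNat : Int) + 1 → (Nat.sqrt n.toNat : Int) ≤ hi →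
      ((lo = 0 ∧ res = none) ∨
        (1 ≤ lo ∧ res = some ((lo - 1) * (lo - 1)) ∧ (lo - 1) * (lo - 1) < n)) →
      pvLoopA n lo hi res = some ((Nat.sqrt n.toNat : Int) * (Nat.sqrt n.toNat : Int)) := by
  intro k
  induction k with
  | zero =>
      intro lo hi res hk hlo hls hsh hres
      -- measure 0 forces hi < lo, but s ≤ hi < lo ≤ s+1 gives lo = s+1 and exit
      rw [pvLoopA]
      have hexit : ¬ lo ≤ hi := by omega
      simp only [hexit, dite_false]
      rcases hres with ⟨h0, -⟩ | ⟨h1, hr, -⟩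
      · omega
      · have : lo - 1 = (Nat.sqrt n.toNat : Int) := by omega
        rw [hr, this]
  | succ k ih =>
      intro lo hi res hk hlo hls hsh hres
      rw [pvLoopA]
      by_cases hle : lo ≤ hi
      · simp only [hle, dite_true]
        have hb := PySem.Int.floordiv_two_mid_bounds hle
        set m := PySem.Int.floordiv (lo + hi) 2 with hm
        have hm0 : 0 ≤ m := by omega
        by_cases heq : m * m = n
        · simp only [heq, if_true]
          -- m is exactly the square root
          have hcast : (m.toNat : Int) = m := Int.toNat_of_nonneg hm0
          have hNn : m.toNat * m.toNat = n.toNat := by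
            have : ((m.toNat * m.toNat : Nat) : Int) = (n.toNat : Int) := by
              push_cast [hcast, Int.toNat_of_nonneg hn]; exact heq
            exact_mod_cast this
          have hs : Nat.sqrt n.toNat = m.toNat := by
            rw [← hNn]
            rw [← pow_two]
            exact Nat.sqrt_eq' m.toNat
          rw [hs, hcast, heq]
        · simp only [heq, if_false]
          by_cases hgt : m * m > n
          · simp only [hgt, if_true]
            -- n < m², so sqrt n < m : keep searching left of m
            have hlt : n.toNat < m.toNat * m.toNat := by
              have hcast : (m.toNat : Int) = m := Int.toNat_of_nonneg hm0
              have : ((n.toNat : Int)) < ((m.toNat * m.toNat : Nat) : Int) := by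
                push_cast [hcast, Int.toNat_of_nonneg hn]; exact hgt
              exact_mod_cast this
            have hsm : Nat.sqrt n.toNat < m.toNat := Nat.sqrt_lt.mpr hlt
            have hsm' : (Nat.sqrt n.toNat : Int) < m := by
              have hcast : (m.toNat : Int) = m := Int.toNat_of_nonneg hm0
              omega
            exact ih lo (m - 1) res (by omega) hlo hls (by omega) hres
          · simp only [hgt, if_false]
            -- m² < n, so m ≤ sqrt n : record m² and search right of m
            have hlt : m * m < n := by omega
            have hle' : m.toNat * m.toNat ≤ n.toNat := by
              have hcast : (m.toNat : Int) = m := Int.toNat_of_nonneg hm0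
              have : ((m.toNat * m.toNat : Nat) : Int) ≤ ((n.toNat : Int)) := by
                push_cast [hcast, Int.toNat_of_nonneg hn]; omega
              exact_mod_cast this
            have hms : m.toNat ≤ Nat.sqrt n.toNat := Nat.le_sqrt.mpr hle'
            have hms' : m ≤ (Nat.sqrt n.toNat : Int) := by
              have hcast : (m.toNat : Int) = m := Int.toNat_of_nonneg hm0
              omega
            have := ih (m + 1) hi (some (m * m)) (by omega) (by omega) (by omega) (by omega)
              (Or.inr ⟨by omega, by norm_num, by simpa using hlt⟩)
            simpa using this
      · simp only [hle, dite_false]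
        rcases hres with ⟨h0, -⟩ | ⟨h1, hr, -⟩
        · omega
        · have : lo - 1 = (Nat.sqrt n.toNat : Int) := by omega
          rw [hr, this]

lemma pvLoopB_eq (n : Int) (hn : 0 ≤ n) :
    ∀ (k i : Nat) (res : Option Int),
      Nat.sqrt n.toNat + 1 - i ≤ k →
      i ≤ Nat.sqrt n.toNat + 1 →
      ((i = 0 ∧ res = none) ∨
        (1 ≤ i ∧ res = some (((i : Int) - 1) * ((i : Int) - 1)))) →
      pvLoopB n i res = some ((Nat.sqrt n.toNat : Int) * (Nat.sqrt n.toNat : Int)) := by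
  intro k
  induction k with
  | zero =>
      intro i res hk hi hres
      -- i = s + 1: the loop guard fails immediately
      have hie : i = Nat.sqrt n.toNat + 1 := by omega
      rw [pvLoopB]
      have hgt : ¬ ((i : Int) * i ≤ n) := by
        intro hle
        have : i ≤ Nat.sqrt n.toNat := Nat.le_sqrt.mpr (by
          have : ((i * i : Nat) : Int) ≤ ((n.toNat : Int)) := by
            push_cast [Int.toNat_of_nonneg hn]; exact hle
          exact_mod_cast this)
        omega
      simp only [hgt, dite_false]
      rcases hres with ⟨h0, -⟩ | ⟨h1, hr⟩
      · omega
      · have : (i : Int) - 1 = (Nat.sqrt n.toNat : Int) := by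
          have : (i : Int) = (Nat.sqrt n.toNat : Int) + 1 := by exact_mod_cast congrArg (Nat.cast : Nat → Int) hie
          omega
        rw [hr, this]
  | succ k ih =>
      intro i res hk hi hres
      rw [pvLoopB]
      by_cases hle : (i : Int) * i ≤ n
      · simp only [hle, dite_true]
        have his : i ≤ Nat.sqrt n.toNat := Nat.le_sqrt.mpr (by
          have : ((i * i : Nat) : Int) ≤ ((n.toNat : Int)) := by
            push_cast [Int.toNat_of_nonneg hn]; exact hle
          exact_mod_cast this)
        exact ih (i + 1) (some ((i : Int) * i)) (by omega) (by omega)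
          (Or.inr ⟨by omega, by push_cast; ring_nf⟩)
      · simp only [hle, dite_false]
        -- guard failed: i > sqrt n, and i ≤ sqrt n + 1 forces i = sqrt n + 1
        have hsi : Nat.sqrt n.toNat < i := by
          by_contra hcon
          push Not at hcon
          have h1 : i * i ≤ n.toNat := Nat.le_sqrt.mp hcon
          have : ((i * i : Nat) : Int) ≤ ((n.toNat : Int)) := by exact_mod_cast h1
          rw [Int.toNat_of_nonneg hn] at this
          push_cast at this
          exact hle this
        rcases hres with ⟨h0, -⟩ | ⟨h1, hr⟩
        · omega
        · have hie : i = Nat.sqrt n.toNat + 1 := by omega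
          have : (i : Int) - 1 = (Nat.sqrt n.toNat : Int) := by
            have : (i : Int) = (Nat.sqrt n.toNat : Int) + 1 := by exact_mod_cast congrArg (Nat.cast : Nat → Int) hie
            omega
          rw [hr, this]

-- ===== VERDICT (by name: the statement is the Claim_ definition above) =====
theorem cuadrado_mas_cercano_spec : Claim_equal_cuadrado_mas_cercano := by
  intro n _ hpre
  have hn : 0 ≤ n := hpre
  unfold Spec_cuadrado_mas_cercano cuadrado_mas_cercano cuadrado_mas_cercano_alt
  have hsle : (Nat.sqrt n.toNat : Int) ≤ n := by
    have := Nat.sqrt_le_self n.toNat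
    omega
  have ha := pvLoopA_eq n hn ((n + 1).toNat) 0 n none (by omega) (by omega) (by omega) hsle
    (Or.inl ⟨rfl, rfl⟩)
  have hb := pvLoopB_eq n hn (Nat.sqrt n.toNat + 1) 0 none (by omega) (by omega)
    (Or.inl ⟨rfl, rfl⟩)
  rw [ha, hb]
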